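-- pv_equiv track=rewrite | github.com/cyhhao/vibe-remote | modules/agents/opencode_agent.py | _build_reasoning_options_from_variants
-- ===== SOURCE A (Python) =====
-- from typing import Any, Dict, List, Optional, Tuple
--
-- _REASONING_VARIANT_ORDER = ["none", "minimal", "low", "medium", "high", "xhigh", "max"]
--
-- _REASONING_VARIANT_LABELS = {
--     "none": "None",
--     "minimal": "Minimal",
--     "low": "Low",
--     "medium": "Medium",
--     "high": "High",
--     "xhigh": "Extra High",
--     "max": "Max",
-- }
--
-- def _build_reasoning_options_from_variants(variants: Dict[str, Any]) -> List[Dict[str, str]]: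
--     sorted_variants = sorted(
--         variants.keys(),
--         key=lambda variant: (
--             _REASONING_VARIANT_ORDER.index(variant)
--             if variant in _REASONING_VARIANT_ORDER
--             else len(_REASONING_VARIANT_ORDER),
--             variant,
--         ),
--     )
--     return [
--         {
--             "value": variant_key,
--             "label": _REASONING_VARIANT_LABELS.get(
--                 variant_key, variant_key.capitalize()
--             ),
--         }
--         for variant_key in sorted_variants
--     ]
-- ===== SOURCE B (Python) =====
-- from typing import Any, Dict, List
--
-- _REASONING_VARIANT_ORDER = ["none", "minimal", "low", "medium", "high", "xhigh", "max"]
--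
-- _REASONING_VARIANT_LABELS = {
--     "none": "None",
--     "minimal": "Minimal",
--     "low": "Low",
--     "medium": "Medium",
--     "high": "High",
--     "xhigh": "Extra High",
--     "max": "Max",
-- }
--
-- def _build_reasoning_options_from_variants(variants: Dict[str, Any]) -> List[Dict[str, str]]:
--     # two passes instead of a composite-key sort: known keys come out in the
--     # predefined order, unknown keys are sorted alphabetically and appended
--     known = [k for k in _REASONING_VARIANT_ORDER if k in variants]
--     unknown = sorted(k for k in variants if k not in _REASONING_VARIANT_ORDER)
--     return [
--         {
--             "value": k,
--             "label": _REASONING_VARIANT_LABELS.get(k, k.capitalize()),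
--         }
--         for k in known + unknown
--     ]
-- ===== Notes on version B (the rewrite author's own statement) =====
-- stated objective: alternative
-- what changed: Replaces the composite-key (order-index, name) sort of all keys by two passes: a walk over the predefined order list keeping the keys present in variants, plus an alphabetical sort of only the unknown keys, concatenated.
import Mathlib
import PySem

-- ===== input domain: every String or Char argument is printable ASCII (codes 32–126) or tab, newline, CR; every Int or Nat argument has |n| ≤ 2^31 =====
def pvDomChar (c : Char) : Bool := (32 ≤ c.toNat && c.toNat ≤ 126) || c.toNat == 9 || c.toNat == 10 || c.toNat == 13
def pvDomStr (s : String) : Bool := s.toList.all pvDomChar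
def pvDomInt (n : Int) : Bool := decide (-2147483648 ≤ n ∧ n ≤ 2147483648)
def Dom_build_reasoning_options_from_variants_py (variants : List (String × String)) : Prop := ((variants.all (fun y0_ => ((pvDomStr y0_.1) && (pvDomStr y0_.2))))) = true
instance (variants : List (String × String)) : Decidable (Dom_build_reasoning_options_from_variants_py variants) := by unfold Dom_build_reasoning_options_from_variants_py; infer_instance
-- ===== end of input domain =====

-- B replaces A's composite-key sort of all dict keys by two passes (predefined-order walk for
-- known keys + alphabetical sort of the unknown keys, concatenated): an alternative decomposition.

-- shared module constants
def pvOrder : List String := ["none", "minimal", "low", "medium", "high", "xhigh", "max"]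

def pvLabels : PySem.Dict String String :=
  PySem.Dict.ofList [("none", "None"), ("minimal", "Minimal"), ("low", "Low"),
    ("medium", "Medium"), ("high", "High"), ("xhigh", "Extra High"), ("max", "Max")]

-- s.capitalize(): first char uppercased, the rest lowercased — exact on the ASCII domain
def pyCapitalize (s : String) : String :=
  match s.toList with
  | [] => ""
  | c :: rest => String.ofList (PySem.Chars.upper [c] ++ PySem.Chars.lower rest)

-- _REASONING_VARIANT_ORDER.index(v) if v in _REASONING_VARIANT_ORDER else len(_REASONING_VARIANT_ORDER)
def pvKeyIdx (v : String) : Int :=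
  match PySem.List.index? pvOrder v with
  | some i => (i : Int)
  | none => (7 : Int)

-- ===== PORT A =====
-- the dict's keys in insertion order (first occurrence) = dedup of the pairs' first components
def build_reasoning_options_from_variants_py (variants : List (String × String)) : List (List (String × String)) :=
  let sortedVariants :=
    PySem.List.sorted2 (PySem.List.dedup (variants.map Prod.fst)) pvKeyIdx (fun v => v)
  sortedVariants.map (fun k => [("value", k), ("label", pvLabels.getD k (pyCapitalize k))])

-- ===== PORT B =====
def build_reasoning_options_from_variants_py_alt (variants : List (String × String)) : List (List (String × String)) :=
  let keys := PySem.List.dedup (variants.map Prod.fst)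
  let known := pvOrder.filter (fun k => keys.contains k)
  let unknown := PySem.List.sorted (keys.filter (fun k => !(pvOrder.contains k))) (fun v => v)
  (known ++ unknown).map (fun k => [("value", k), ("label", pvLabels.getD k (pyCapitalize k))])

-- ===== PRECONDITION & SPEC =====
def Spec_build_reasoning_options_from_variants_py (variants : List (String × String)) (out : List (List (String × String))) : Prop := out = build_reasoning_options_from_variants_py_alt variants
instance (variants : List (String × String)) (out : List (List (String × String))) : Decidable (Spec_build_reasoning_options_from_variants_py variants out) := by unfold Spec_build_reasoning_options_from_variants_py; infer_instance

-- ===== CLAIM (what is proved, stated in full; the proofs are below) =====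
def Claim_equal_build_reasoning_options_from_variants_py : Prop := ∀ (variants : List (String × String)), Dom_build_reasoning_options_from_variants_py variants → Spec_build_reasoning_options_from_variants_py variants (build_reasoning_options_from_variants_py variants)

-- ===== LEMMAS AND PROOFS =====

-- A's tuple-key sort is the sort by the lexicographic key (pvKeyIdx v, v)
theorem sorted2_eq_sorted_lex (xs : List String) :
    PySem.List.sorted2 xs pvKeyIdx (fun v => v) =
      PySem.List.sorted xs (fun v => (toLex (pvKeyIdx v, v) : Int ×ₗ String)) := by
  have hbf : (fun a b : String =>
        decide (pvKeyIdx a < pvKeyIdx b) ||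
          (!decide (pvKeyIdx b < pvKeyIdx a) && decide (a < b))) =
      (fun a b : String =>
        decide ((toLex (pvKeyIdx a, a) : Int ×ₗ String) < toLex (pvKeyIdx b, b))) := by
    funext a b
    rcases lt_trichotomy (pvKeyIdx a) (pvKeyIdx b) with h | h | h
    · simp [Prod.Lex.lt_iff, h, not_lt_of_gt h]
    · simp [Prod.Lex.lt_iff, h]
    · simp [Prod.Lex.lt_iff, h.ne', not_lt_of_gt h, decide_eq_true h]
  simp only [PySem.List.sorted2, PySem.List.sorted, if_neg (by decide : ¬ (false = true)), hbf]

theorem keyIdx_lt_of_mem (a : String) (h : a ∈ pvOrder) : pvKeyIdx a < 7 := by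
  fin_cases h <;> decide

theorem keyIdx_eq_of_not_mem (a : String) (h : pvOrder.contains a = false) : pvKeyIdx a = 7 := by
  have hmem : a ∉ pvOrder := by simpa [List.contains_iff_mem] using h
  simp [pvKeyIdx, PySem.List.index?, List.idxOf?_eq_none_iff.mpr hmem]

theorem pairwise_lt_of_pairwise_le_nodup {l : List String}
    (hle : l.Pairwise (fun a b => a ≤ b)) (hnd : l.Nodup) :
    l.Pairwise (fun a b => a < b) :=
  (hle.and hnd).imp (fun ⟨h1, h2⟩ => lt_of_le_of_ne h1 h2)

theorem build_reasoning_options_from_variants_py_spec : Claim_equal_build_reasoning_options_from_variants_py := by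
  intro variants _
  unfold Spec_build_reasoning_options_from_variants_py
  unfold build_reasoning_options_from_variants_py build_reasoning_options_from_variants_py_alt
  simp only
  set keys := PySem.List.dedup (variants.map Prod.fst) with hkeys
  have hknd : keys.Nodup := PySem.List.nodup_dedup _
  set known := pvOrder.filter (fun k => keys.contains k) with hknown
  set unknown := PySem.List.sorted (keys.filter (fun k => !(pvOrder.contains k))) (fun v => v)
    with hunknown
  congr 1
  rw [sorted2_eq_sorted_lex]
  refine PySem.List.sorted_eq_of_perm_of_pairwise_lt _ _ _ ?_ ?_
  · -- (known ++ unknown).Perm keys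
    have hperm1 : unknown.Perm (keys.filter (fun k => !(pvOrder.contains k))) :=
      PySem.List.sorted_perm _ _ _
    have hperm2 : known.Perm (keys.filter (fun k => pvOrder.contains k)) := by
      apply List.perm_of_nodup_nodup_toFinset_eq
      · exact (by decide : pvOrder.Nodup).filter _
      · exact hknd.filter _
      · ext a
        simp only [List.mem_toFinset, hknown, List.mem_filter, List.contains_iff_mem]
        constructor
        · rintro ⟨h1, h2⟩; exact ⟨by simpa using h2, by simpa [List.contains_iff_mem] using h1⟩
        · rintro ⟨h1, h2⟩
          exact ⟨by simpa [List.contains_iff_mem] using h2, by simpa using h1⟩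
    exact (hperm2.append hperm1).trans (List.filter_append_perm _ _)
  · -- strictly increasing under the lexicographic key
    rw [List.pairwise_append]
    have hmem_unknown : ∀ b ∈ unknown, pvKeyIdx b = 7 := by
      intro b hb
      have : b ∈ keys.filter (fun k => !(pvOrder.contains k)) :=
        (PySem.List.mem_sorted _ _ _ _).mp hb
      exact keyIdx_eq_of_not_mem b (by simpa using (List.mem_filter.mp this).2)
    refine ⟨?_, ?_, ?_⟩
    · -- within known
      have hord : pvOrder.Pairwise (fun a b => pvKeyIdx a < pvKeyIdx b) := by decide
      exact (hord.filter _).imp (fun h => Prod.Lex.lt_iff.mpr (Or.inl h))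
    · -- within unknown
      have hnd : unknown.Nodup := ((PySem.List.sorted_perm _ _ _).nodup_iff).mpr (hknd.filter _)
      have hle : unknown.Pairwise (fun a b => a ≤ b) := PySem.List.sorted_pairwise _ _
      refine (pairwise_lt_of_pairwise_le_nodup hle hnd).imp_of_mem ?_
      intro a b ha hb h
      exact Prod.Lex.lt_iff.mpr (Or.inr ⟨by simp [hmem_unknown a ha, hmem_unknown b hb], h⟩)
    · -- known before unknown
      intro a ha b hb
      have ha' : a ∈ pvOrder := (List.mem_filter.mp ha).1
      exact Prod.Lex.lt_iff.mpr (Or.inl (by rw [hmem_unknown b hb]; exact keyIdx_lt_of_mem a ha'))
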